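-- pv_equiv track=rewrite | github.com/justinnuwin/dotfiles | scripts/copy_to_repo.py | get_dirs_from_path
-- ===== SOURCE A (Python) =====
-- def get_dirs_from_path(path):
--     if '/' in path:
--         dirs_path = ""
--         tokens = path.split('/')
--         for token in tokens[:-1]:
--             dirs_path += token + '/'
--         return dirs_path
--     else:
--         return path
-- ===== SOURCE B (Python) =====
-- def get_dirs_from_path(path):
--     if '/' in path:
--         return path[:path.rfind('/') + 1]
--     else:
--         return path
-- ===== Notes on version B (the rewrite author's own statement) =====
-- stated objective: simpler
-- what changed: Replaces tokenizing the path with split and rebuilding the directory prefix in a concatenation loop by a single rfind of the last separator and one slice up to and including it.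
import Mathlib
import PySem

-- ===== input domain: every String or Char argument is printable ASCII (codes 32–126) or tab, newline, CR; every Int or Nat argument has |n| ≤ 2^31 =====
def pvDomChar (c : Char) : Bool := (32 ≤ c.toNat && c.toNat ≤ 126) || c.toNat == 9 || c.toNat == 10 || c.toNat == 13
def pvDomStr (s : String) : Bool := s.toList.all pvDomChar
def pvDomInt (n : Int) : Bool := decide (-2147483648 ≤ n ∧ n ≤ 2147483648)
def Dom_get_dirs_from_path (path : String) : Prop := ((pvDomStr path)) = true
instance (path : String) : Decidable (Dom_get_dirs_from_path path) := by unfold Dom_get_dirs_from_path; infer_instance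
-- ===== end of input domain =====

-- B replaces tokenizing with split('/') and rebuilding the prefix in a loop by one rfind of the last '/' and a single slice (simpler).

-- ===== PORT A =====
-- '/' in path is a single-character substring test, exact as List.contains on the code points
def get_dirs_from_path (path : String) : String :=
  if path.toList.contains '/' then
    let tokens := PySem.Chars.splitOn path.toList ['/']
    let dirs_path := (PySem.List.slice tokens none (some (-1))).foldl
      (fun acc tok => acc ++ tok ++ ['/']) ([] : List Char)
    String.ofList dirs_path
  else path

-- ===== PORT B =====
def get_dirs_from_path_alt (path : String) : String :=
  if path.toList.contains '/' then
    PySem.Str.slice path none (some (PySem.Str.rfind path "/" + 1))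
  else path

-- ===== PRECONDITION & SPEC =====
def Spec_get_dirs_from_path (path : String) (out : String) : Prop := out = get_dirs_from_path_alt path
instance (path : String) (out : String) : Decidable (Spec_get_dirs_from_path path out) := by unfold Spec_get_dirs_from_path; infer_instance

-- ===== CLAIM (what is proved, stated in full; the proofs are below) =====
def Claim_equal_get_dirs_from_path : Prop := ∀ (path : String), Dom_get_dirs_from_path path → Spec_get_dirs_from_path path (get_dirs_from_path path)

-- ===== LEMMAS AND PROOFS =====

-- reference splitter: spTok cur l = the tokens of (cur ++ l) split at '/', cur being the token under construction
def spTok : List Char → List Char → List (List Char)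
  | cur, [] => [cur]
  | cur, c :: rest => if c = '/' then cur :: spTok [] rest else spTok (cur ++ [c]) rest

theorem spTok_ne_nil (l cur : List Char) : spTok cur l ≠ [] := by
  induction l generalizing cur with
  | nil => simp [spTok]
  | cons c rest ih => by_cases h : c = '/' <;> simp [spTok, h, ih]

theorem spTok_no_slash (l : List Char) (h : '/' ∉ l) (cur : List Char) :
    spTok cur l = [cur ++ l] := by
  induction l generalizing cur with
  | nil => simp [spTok]
  | cons c rest ih =>
    simp only [List.mem_cons, not_or] at h
    rw [spTok, if_neg (Ne.symm h.1), ih h.2]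
    simp

theorem splitOn_go_eq_spTok (fuel : Nat) :
    ∀ (l cur : List Char) (acc : List (List Char)), l.length < fuel →
      PySem.Chars.splitOn.go ['/'] fuel l cur acc = acc.reverse ++ spTok cur.reverse l := by
  induction fuel with
  | zero => intro l cur acc h; simp at h
  | succ fuel ih =>
    intro l cur acc h
    cases l with
    | nil => simp only [PySem.Chars.splitOn.go, spTok]; simp
    | cons c rest =>
      by_cases hc : c = '/'
      · subst hc
        have step : PySem.Chars.splitOn.go ['/'] (fuel+1) ('/'::rest) cur acc
            = PySem.Chars.splitOn.go ['/'] fuel rest [] (cur.reverse :: acc) := by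
          simp only [PySem.Chars.splitOn.go, List.isPrefixOf]; simp
        rw [step, ih rest [] (cur.reverse :: acc) (by simp at h ⊢; omega)]
        rw [spTok, if_pos rfl]
        simp
      · have step : PySem.Chars.splitOn.go ['/'] (fuel+1) (c::rest) cur acc
            = PySem.Chars.splitOn.go ['/'] fuel rest (c::cur) acc := by
          simp only [PySem.Chars.splitOn.go, List.isPrefixOf]; simp [Ne.symm hc]
        rw [step, ih rest (c::cur) acc (by simp at h ⊢; omega)]
        rw [spTok, if_neg hc]
        simp

theorem flat_spTok (pre suf : List Char) (hs : '/' ∉ suf) :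
    ∀ cur : List Char,
      ((spTok cur (pre ++ '/' :: suf)).dropLast.map (· ++ ['/'])).flatten = cur ++ pre ++ ['/'] := by
  induction pre with
  | nil =>
    intro cur
    rw [List.nil_append, spTok, if_pos rfl, spTok_no_slash suf hs]
    simp
  | cons c pre' ih =>
    intro cur
    by_cases hc : c = '/'
    · subst hc
      have hne : spTok ([] : List Char) (pre' ++ '/' :: suf) ≠ [] := spTok_ne_nil _ _
      rw [List.cons_append, spTok, if_pos rfl,
        List.dropLast_cons_of_ne_nil hne, List.map_cons, List.flatten_cons, ih []]
      simp
    · rw [List.cons_append, spTok, if_neg hc, ih (cur ++ [c])]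
      simp

theorem rfind_go_last (pre suf : List Char) (hs : '/' ∉ suf) :
    ∀ j : Nat, pre.length ≤ j → j ≤ (pre ++ '/' :: suf).length →
      PySem.Chars.rfind.go (pre ++ '/' :: suf) ['/'] j = pre.length := by
  intro j
  induction j with
  | zero =>
    intro h1 _
    have : pre = [] := List.eq_nil_of_length_eq_zero (by omega)
    subst this
    simp only [PySem.Chars.rfind.go, List.nil_append]
    simp [List.isPrefixOf]
  | succ j ih =>
    intro h1 h2
    by_cases he : pre.length = j + 1
    · simp only [PySem.Chars.rfind.go]
      rw [if_pos]
      · omega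
      · rw [← he, List.drop_left]
        simp [List.isPrefixOf]
    · have hle : pre.length ≤ j := by omega
      simp only [PySem.Chars.rfind.go]
      rw [if_neg, ih hle (by omega)]
      intro hp
      have hmem : '/' ∈ List.drop (j + 1) (pre ++ '/' :: suf) :=
        (List.isPrefixOf_iff_prefix.mp hp).subset (by simp)
      have hdec : pre ++ '/' :: suf = (pre ++ ['/']) ++ suf := by simp
      have hlen : j + 1 = (pre ++ ['/']).length + (j - pre.length) := by simp; omega
      rw [hdec, hlen, List.drop_append] at hmem
      rcases List.mem_append.mp hmem with h' | h'
      · rw [List.drop_eq_nil_of_le (by omega)] at h'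
        exact absurd h' (List.not_mem_nil)
      · exact hs (List.mem_of_mem_drop h')

theorem last_slash_decomp (cs : List Char) (h : '/' ∈ cs) :
    ∃ pre suf : List Char, cs = pre ++ '/' :: suf ∧ '/' ∉ suf := by
  induction cs with
  | nil => simp at h
  | cons c rest ih =>
    by_cases hr : '/' ∈ rest
    · obtain ⟨pre, suf, heq, hns⟩ := ih hr
      exact ⟨c :: pre, suf, by simp [heq], hns⟩
    · have hc : c = '/' := by
        rcases List.mem_cons.mp h with h1 | h1
        · exact h1.symm
        · exact absurd h1 hr
      exact ⟨[], rest, by simp [hc], hr⟩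

-- ===== VERDICT (by name: the statement is the Claim_ definition above) =====
theorem get_dirs_from_path_spec : Claim_equal_get_dirs_from_path := by
  intro path _
  unfold Spec_get_dirs_from_path get_dirs_from_path get_dirs_from_path_alt
  by_cases h : path.toList.contains '/'
  · simp only [h, if_pos]
    obtain ⟨pre, suf, heq, hns⟩ := last_slash_decomp path.toList (by simpa using h)
    -- A side
    have hsplit : PySem.Chars.splitOn path.toList ['/'] = spTok [] path.toList := by
      unfold PySem.Chars.splitOn
      rw [splitOn_go_eq_spTok (path.toList.length + 1) path.toList [] [] (by omega)]
      simp
    have hfun : (fun (acc tok : List Char) => acc ++ tok ++ ['/'])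
        = fun acc tok => acc ++ (tok ++ ['/']) := by
      funext a t; simp
    have hA : (PySem.List.slice (PySem.Chars.splitOn path.toList ['/']) none (some (-1))).foldl
        (fun acc tok => acc ++ tok ++ ['/']) ([] : List Char) = pre ++ ['/'] := by
      rw [hsplit, PySem.List.slice_to_neg_one, hfun,
        PySem.List.foldl_append_eq_flatMap (fun tok => tok ++ ['/']) _ []]
      rw [List.flatMap_def]
      have := flat_spTok pre suf hns []
      rw [heq]
      simpa using this
    -- B side
    have hrfind : PySem.Str.rfind path "/" = (pre.length : Int) := by
      show PySem.Chars.rfind path.toList _ = _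
      have : ("/" : String).toList = ['/'] := rfl
      rw [this]
      unfold PySem.Chars.rfind
      rw [heq, rfind_go_last pre suf hns _ (by simp) (by rw [← heq])]
    have hB : PySem.Str.slice path none (some (PySem.Str.rfind path "/" + 1))
        = String.ofList (pre ++ ['/']) := by
      rw [hrfind]
      show String.ofList (PySem.Chars.slice path.toList none (some ((pre.length : Int) + 1))) = _
      rw [PySem.Chars.slice_eq_listSlice, PySem.List.slice_to _ (by positivity)]
      congr 1
      rw [heq]
      have hn : ((pre.length : Int) + 1).toNat = pre.length + 1 := by omega
      rw [hn]
      have : pre ++ '/' :: suf = (pre ++ ['/']) ++ suf := by simp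
      rw [this]
      have hlen : pre.length + 1 = (pre ++ ['/']).length := by simp
      rw [hlen, List.take_left]
    rw [hA, hB]
  · have h' : '/' ∉ path.toList := by simpa using h
    simp [h']
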